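-- pv_equiv track=rewrite | github.com/gbaghdasaryan94/Kapan | Garnik/Python 3/Lists/6.py | replace_underscores
-- ===== SOURCE A (Python) =====
-- def replace_underscores(sentence):
--     # sentence = "May the _ _ _ _."
--     replacewords = ["Force", 'be', 'with', 'you']
--     count = 0
--     for letter in sentence:
--         if letter == "_":
--             sentence = sentence.replace("_", replacewords[count], 1)
--             count += 1
--     return sentence
-- ===== SOURCE B (Python) =====
-- def replace_underscores(sentence):
--     # One linear scan: emit each char, substituting the next word at each '_'.
--     replacewords = ["Force", 'be', 'with', 'you']
--     result = []
--     idx = 0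
--     for ch in sentence:
--         if ch == "_":
--             result.append(replacewords[idx])
--             idx += 1
--         else:
--             result.append(ch)
--     return "".join(result)
-- ===== Notes on version B (the rewrite author's own statement) =====
-- stated objective: simpler
-- what changed: Replaces A's mutate-and-rescan strategy (each '_' seen triggers a fresh replace-from-the-start of the whole current string) with a single left-to-right pass that emits either the char or the next replacement word and joins once at the end.
import Mathlib
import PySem

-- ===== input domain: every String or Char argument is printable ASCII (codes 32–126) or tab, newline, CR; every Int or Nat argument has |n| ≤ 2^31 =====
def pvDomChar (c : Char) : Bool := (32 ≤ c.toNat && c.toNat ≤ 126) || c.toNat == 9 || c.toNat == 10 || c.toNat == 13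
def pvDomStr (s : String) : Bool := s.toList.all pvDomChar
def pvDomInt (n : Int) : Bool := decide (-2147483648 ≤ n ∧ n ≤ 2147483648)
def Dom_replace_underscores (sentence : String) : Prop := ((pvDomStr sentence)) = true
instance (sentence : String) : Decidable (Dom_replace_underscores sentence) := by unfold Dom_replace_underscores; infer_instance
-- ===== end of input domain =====

-- ===== PORT A =====
-- B builds the output in one left-to-right pass instead of A's mutate-and-rescan replaces; same output (A = B proved below).
-- A raises IndexError past the 4th underscore; Pre_ excludes those inputs (B raises there too).

-- the fixed word for count k: replacewords[k] (out of range → "" ; Pre_ keeps count in range)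
def pvWord (k : Nat) : List Char :=
  ((["Force", "be", "with", "you"][k]?).getD "").toList

-- sentence.replace("_", w, 1): replace the FIRST '_' (exact for a 1-char pattern, count=1)
def pvReplaceFirst (s : List Char) (w : List Char) : List Char :=
  match s with
  | [] => []
  | c :: t => if c = '_' then w ++ t else c :: pvReplaceFirst t w

def pvStepA (st : List Char × Nat) (letter : Char) : List Char × Nat :=
  if letter = '_' then (pvReplaceFirst st.1 (pvWord st.2), st.2 + 1) else st

def replace_underscores (sentence : String) : String :=
  String.mk (sentence.toList.foldl pvStepA (sentence.toList, 0)).1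

-- ===== PORT B =====
def pvGoB (cs : List Char) (idx : Nat) : List Char :=
  match cs with
  | [] => []
  | c :: t => if c = '_' then pvWord idx ++ pvGoB t (idx + 1) else c :: pvGoB t idx

def replace_underscores_alt (sentence : String) : String :=
  String.mk (pvGoB sentence.toList 0)

-- ===== PRECONDITION & SPEC =====
-- Pre_ excludes exactly the inputs with more than 4 underscores, on which A raises IndexError.
def Pre_replace_underscores (sentence : String) : Prop :=
  sentence.toList.count '_' ≤ 4
instance (sentence : String) : Decidable (Pre_replace_underscores sentence) := by
  unfold Pre_replace_underscores; infer_instance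
def pvWitness_replace_underscores : String := "May the _ _ _ _."

def Spec_replace_underscores (sentence : String) (out : String) : Prop := out = replace_underscores_alt sentence
instance (sentence : String) (out : String) : Decidable (Spec_replace_underscores sentence out) := by unfold Spec_replace_underscores; infer_instance

-- ===== CLAIM (what is proved, stated in full; the proofs are below) =====
def Claim_equal_replace_underscores : Prop := ∀ (sentence : String), Dom_replace_underscores sentence → Pre_replace_underscores sentence → Spec_replace_underscores sentence (replace_underscores sentence)

-- ===== LEMMAS AND PROOFS =====

lemma pvWord_no_underscore (k : Nat) : '_' ∉ pvWord k := by
  match k with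
  | 0 | 1 | 2 | 3 => decide
  | n + 4 => simp [pvWord]

lemma pvReplaceFirst_append (done rest w : List Char) (h : '_' ∉ done) :
    pvReplaceFirst (done ++ rest) w = done ++ pvReplaceFirst rest w := by
  induction done with
  | nil => rfl
  | cons c t ih =>
    simp only [List.mem_cons, not_or] at h
    simp [pvReplaceFirst, Ne.symm h.1, ih h.2]

lemma pv_main (rest : List Char) : ∀ (done : List Char) (k : Nat), '_' ∉ done →
    rest.foldl pvStepA (done ++ rest, k) = (done ++ pvGoB rest k, k + rest.count '_') := by
  induction rest with
  | nil => intro done k _; simp [pvGoB]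
  | cons c t ih =>
    intro done k h
    by_cases hc : c = '_'
    · subst hc
      have h1 : pvStepA (done ++ '_' :: t, k) '_' = ((done ++ pvWord k) ++ t, k + 1) := by
        simp [pvStepA, pvReplaceFirst_append done ('_' :: t) (pvWord k) h, pvReplaceFirst]
      have h2 : '_' ∉ done ++ pvWord k := by
        simp only [List.mem_append, not_or]
        exact ⟨h, pvWord_no_underscore k⟩
      simp only [List.foldl_cons, h1, ih (done ++ pvWord k) (k + 1) h2]
      simp [pvGoB]
      omega
    · have h1 : pvStepA (done ++ c :: t, k) c = ((done ++ [c]) ++ t, k) := by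
        simp [pvStepA, hc]
      have h2 : '_' ∉ done ++ [c] := by
        simp only [List.mem_append, List.mem_singleton, not_or]
        exact ⟨h, fun e => hc e.symm⟩
      simp only [List.foldl_cons, h1, ih (done ++ [c]) k h2]
      simp [pvGoB, hc]

-- ===== VERDICT (by name: the statement is the Claim_ definition above) =====
theorem replace_underscores_spec : Claim_equal_replace_underscores := by
  intro sentence _ _
  unfold Spec_replace_underscores replace_underscores replace_underscores_alt
  have := pv_main sentence.toList [] 0 (by simp)
  simp only [List.nil_append] at this
  rw [this]
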